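-- pv_equiv track=rewrite | github.com/jjoshua2/arc_agi | unsolved/2025-10-13T03-48-21Z/50846271_best1.py | transform
-- ===== SOURCE A (Python) =====
-- def transform(grid_lst: list[list[int]]) -> list[list[int]]:
--     if not grid_lst or not grid_lst[0]:
--         return []
--     grid = [row[:] for row in grid_lst]
--     rows = len(grid)
--     cols = len(grid[0])
--     output = [row[:] for row in grid]
--
--     # Filling gaps
--     for r in range(rows):
--         red_cols = [c for c in range(cols) if grid[r][c] == 2]
--         if len(red_cols) >= 2:
--             min_c = min(red_cols)
--             max_c = max(red_cols)
--             for c in range(min_c, max_c + 1):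
--                 if grid[r][c] == 5:
--                     output[r][c] = 8
--
--     for c in range(cols):
--         red_rows = [r for r in range(rows) if grid[r][c] == 2]
--         if len(red_rows) >= 2:
--             min_r = min(red_rows)
--             max_r = max(red_rows)
--             for rr in range(min_r, max_r + 1):
--                 if grid[rr][c] == 5:
--                     output[rr][c] = 8
--
--     # Define bars based on original red positions
--     h_bars = []
--     for r in range(rows):
--         red_cols = [c for c in range(cols) if grid[r][c] == 2]
--         if len(red_cols) >= 2:
--             h_bars.append((r, min(red_cols), max(red_cols)))
--
--     v_bars = []
--     for c in range(cols):
--         red_rows = [r for r in range(rows) if grid[r][c] == 2]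
--         if len(red_rows) >= 2:
--             v_bars.append((c, min(red_rows), max(red_rows)))
--
--     # Extensions for symmetry at intersections
--     for r, h_left, h_right in h_bars:
--         for c, v_top, v_bottom in v_bars:
--             if h_left <= c <= h_right and v_top <= r <= v_bottom:
--                 up_len = r - v_top
--                 down_len = v_bottom - r
--                 left_len = c - h_left
--                 right_len = h_right - c
--
--                 max_ud = max(up_len, down_len)
--                 if up_len < max_ud:
--                     ext = max_ud - up_len
--                     for k in range(1, ext + 1):
--                         nr = v_top - k
--                         if 0 <= nr < rows and grid[nr][c] == 5:
--                             output[nr][c] = 8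
--                 if down_len < max_ud:
--                     ext = max_ud - down_len
--                     for k in range(1, ext + 1):
--                         nr = v_bottom + k
--                         if 0 <= nr < rows and grid[nr][c] == 5:
--                             output[nr][c] = 8
--
--                 max_lr = max(left_len, right_len)
--                 if left_len < max_lr:
--                     ext = max_lr - left_len
--                     for k in range(1, ext + 1):
--                         nc = h_left - k
--                         if 0 <= nc < cols and grid[r][nc] == 5:
--                             output[r][nc] = 8
--                 if right_len < max_lr:
--                     ext = max_lr - right_len
--                     for k in range(1, ext + 1):
--                         nc = h_right + k
--                         if 0 <= nc < cols and grid[r][nc] == 5: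
--                             output[r][nc] = 8
--
--     return output
-- ===== SOURCE B (Python) =====
-- def transform(grid_lst: list[list[int]]) -> list[list[int]]:
--     if not grid_lst or not grid_lst[0]:
--         return []
--     rows, cols = len(grid_lst), len(grid_lst[0])
--
--     # Red extent of each row / column within the rows x cols rectangle,
--     # or None where there are fewer than two reds.
--     rowspan = []
--     for r in range(rows):
--         reds = [c for c in range(cols) if grid_lst[r][c] == 2]
--         rowspan.append((reds[0], reds[-1]) if len(reds) >= 2 else None)
--     colspan = []
--     for c in range(cols):
--         reds = [r for r in range(rows) if grid_lst[r][c] == 2]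
--         colspan.append((reds[0], reds[-1]) if len(reds) >= 2 else None)
--
--     # Declarative per-cell rule: a cell lights up iff it lies in a bar gap,
--     # or in the mirror image (across some intersection) of a bar arm.
--     def lit(r, c):
--         hs, vs = rowspan[r], colspan[c]
--         if hs is not None and hs[0] <= c <= hs[1]:
--             return True
--         if vs is not None and vs[0] <= r <= vs[1]:
--             return True
--         if vs is not None:
--             vt, vb = vs
--             for r0 in range(rows):
--                 h0 = rowspan[r0]
--                 if h0 is not None and h0[0] <= c <= h0[1] and vt <= r0 <= vb \
--                         and (2 * r0 - vb <= r < vt or vb < r <= 2 * r0 - vt):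
--                     return True
--         if hs is not None:
--             hl, hr = hs
--             for c0 in range(cols):
--                 v0 = colspan[c0]
--                 if v0 is not None and v0[0] <= r <= v0[1] and hl <= c0 <= hr \
--                         and (2 * c0 - hr <= c < hl or hr < c <= 2 * c0 - hl):
--                     return True
--         return False
--
--     return [[8 if c < cols and row[c] == 5 and lit(r, c) else row[c]
--              for c in range(len(row))]
--             for r, row in enumerate(grid_lst)]
-- ===== Notes on version B (the rewrite author's own statement) =====
-- stated objective: alternative
-- what changed: A paints: four imperative passes mutate a copied grid, writing 8s along gap intervals and per-step extension loops; B is declarative and paints nothing: it precomputes the red span (first,last) of each row and column once, then decides each cell independently by a per-cell predicate (cell lies inside a row/column gap, or inside the mirror image of a bar arm across some intersection) and renders the grid in one pass, with no mutation and no interval writes.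
-- outside the precondition, e.g. on transform([[2, 5, 2], [0]]): A raises IndexError, B raises IndexError
import Mathlib
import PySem

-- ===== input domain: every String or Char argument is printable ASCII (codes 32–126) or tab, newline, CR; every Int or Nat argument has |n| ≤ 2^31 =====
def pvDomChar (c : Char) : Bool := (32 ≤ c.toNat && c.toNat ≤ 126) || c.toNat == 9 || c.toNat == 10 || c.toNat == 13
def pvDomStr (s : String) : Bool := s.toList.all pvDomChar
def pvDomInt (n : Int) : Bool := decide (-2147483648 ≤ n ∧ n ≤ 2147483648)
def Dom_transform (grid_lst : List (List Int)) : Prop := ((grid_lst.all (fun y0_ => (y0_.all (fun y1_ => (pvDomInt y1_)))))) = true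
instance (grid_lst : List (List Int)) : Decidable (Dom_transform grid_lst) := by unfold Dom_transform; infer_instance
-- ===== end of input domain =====

-- B replaces A's four painting passes over a mutated grid copy by a declarative per-cell rule:
-- precompute each row's/column's red span once, then decide every cell independently (gap or
-- mirrored arm across an intersection) and render in one pass; objective: alternative.

-- ===== PORT A =====
-- grid[r][c] (indices nonnegative at every use site; exact there)
def pvCellA (g : List (List Int)) (r c : Int) : Int :=
  PySem.List.pyGetD (PySem.List.pyGetD g r []) c 0

-- Python's two-line pattern 'if grid[r][c] == 5: output[r][c] = 8'
def pvMarkA (g o : List (List Int)) (r c : Int) : List (List Int) :=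
  if pvCellA g r c = 5 then
    PySem.List.pySetD o r (PySem.List.pySetD (PySem.List.pyGetD o r []) c 8)
  else o

-- '[c for c in range(cols) if grid[r][c] == 2]' (this comprehension appears verbatim in both Pythons)
def pvRedCols (g : List (List Int)) (cols r : Int) : List Int :=
  (PySem.List.pyRange 0 cols 1).filter (fun c => decide (pvCellA g r c = 2))

def pvRedRows (g : List (List Int)) (rows c : Int) : List Int :=
  (PySem.List.pyRange 0 rows 1).filter (fun r => decide (pvCellA g r c = 2))

-- the h_bars / v_bars construction loops
def pvHBars (g : List (List Int)) (rows cols : Int) : List (Int × Int × Int) :=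
  (PySem.List.pyRange 0 rows 1).foldl (fun acc r =>
    let red_cols := pvRedCols g cols r
    if 2 ≤ red_cols.length then
      acc ++ [(r, (PySem.List.min? red_cols (fun x => x)).getD 0,
                  (PySem.List.max? red_cols (fun x => x)).getD 0)]
    else acc) []

def pvVBars (g : List (List Int)) (rows cols : Int) : List (Int × Int × Int) :=
  (PySem.List.pyRange 0 cols 1).foldl (fun acc c =>
    let red_rows := pvRedRows g rows c
    if 2 ≤ red_rows.length then
      acc ++ [(c, (PySem.List.min? red_rows (fun x => x)).getD 0,
                  (PySem.List.max? red_rows (fun x => x)).getD 0)]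
    else acc) []

def pvPassRows (g : List (List Int)) (rows cols : Int) (output : List (List Int)) : List (List Int) :=
  (PySem.List.pyRange 0 rows 1).foldl (fun output r =>
    let red_cols := pvRedCols g cols r
    if 2 ≤ red_cols.length then
      let min_c := (PySem.List.min? red_cols (fun x => x)).getD 0
      let max_c := (PySem.List.max? red_cols (fun x => x)).getD 0
      (PySem.List.pyRange min_c (max_c + 1) 1).foldl (fun output c =>
        pvMarkA g output r c) output
    else output) output

def pvPassCols (g : List (List Int)) (rows cols : Int) (output : List (List Int)) : List (List Int) :=
  (PySem.List.pyRange 0 cols 1).foldl (fun output c =>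
    let red_rows := pvRedRows g rows c
    if 2 ≤ red_rows.length then
      let min_r := (PySem.List.min? red_rows (fun x => x)).getD 0
      let max_r := (PySem.List.max? red_rows (fun x => x)).getD 0
      (PySem.List.pyRange min_r (max_r + 1) 1).foldl (fun output rr =>
        pvMarkA g output rr c) output
    else output) output

-- 'Extensions for symmetry at intersections'
def pvPassExt (g : List (List Int)) (rows cols : Int) (output : List (List Int)) : List (List Int) :=
  (pvHBars g rows cols).foldl (fun output hb =>
    (pvVBars g rows cols).foldl (fun output vb =>
      let r := hb.1; let h_left := hb.2.1; let h_right := hb.2.2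
      let c := vb.1; let v_top := vb.2.1; let v_bottom := vb.2.2
      if h_left ≤ c ∧ c ≤ h_right ∧ v_top ≤ r ∧ r ≤ v_bottom then
        let up_len := r - v_top
        let down_len := v_bottom - r
        let left_len := c - h_left
        let right_len := h_right - c
        let max_ud := max up_len down_len
        let output := if up_len < max_ud then
            (PySem.List.pyRange 1 (max_ud - up_len + 1) 1).foldl (fun output k =>
              let nr := v_top - k
              if 0 ≤ nr ∧ nr < rows then pvMarkA g output nr c else output) output
          else output
        let output := if down_len < max_ud then
            (PySem.List.pyRange 1 (max_ud - down_len + 1) 1).foldl (fun output k =>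
              let nr := v_bottom + k
              if 0 ≤ nr ∧ nr < rows then pvMarkA g output nr c else output) output
          else output
        let max_lr := max left_len right_len
        let output := if left_len < max_lr then
            (PySem.List.pyRange 1 (max_lr - left_len + 1) 1).foldl (fun output k =>
              let nc := h_left - k
              if 0 ≤ nc ∧ nc < cols then pvMarkA g output r nc else output) output
          else output
        if right_len < max_lr then
            (PySem.List.pyRange 1 (max_lr - right_len + 1) 1).foldl (fun output k =>
              let nc := h_right + k
              if 0 ≤ nc ∧ nc < cols then pvMarkA g output r nc else output) output
          else output
      else output) output) output

def transform (grid_lst : List (List Int)) : List (List Int) :=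
  if grid_lst = [] ∨ PySem.List.pyGetD grid_lst 0 [] = [] then []
  else
    let grid := grid_lst
    let rows : Int := grid.length
    let cols : Int := (PySem.List.pyGetD grid 0 []).length
    let output := pvPassRows grid rows cols grid      -- Filling gaps: rows
    let output := pvPassCols grid rows cols output    -- Filling gaps: columns
    pvPassExt grid rows cols output

-- ===== PORT B =====
-- rowspan: per row, (reds[0], reds[-1]) if the row has ≥2 reds, else None
def pvRowSpan (g : List (List Int)) (rows cols : Int) : List (Option (Int × Int)) :=
  (PySem.List.pyRange 0 rows 1).foldl (fun acc r =>
    let reds := pvRedCols g cols r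
    acc ++ [if 2 ≤ reds.length then
      some ((PySem.List.pyGet? reds 0).getD 0, (PySem.List.pyGet? reds (-1)).getD 0)
    else none]) []

def pvColSpan (g : List (List Int)) (rows cols : Int) : List (Option (Int × Int)) :=
  (PySem.List.pyRange 0 cols 1).foldl (fun acc c =>
    let reds := pvRedRows g rows c
    acc ++ [if 2 ≤ reds.length then
      some ((PySem.List.pyGet? reds 0).getD 0, (PySem.List.pyGet? reds (-1)).getD 0)
    else none]) []

-- the per-cell predicate 'lit(r, c)' (the four early returns become ||)
def pvLit (rowspan colspan : List (Option (Int × Int))) (rows cols r c : Int) : Bool :=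
  let hs := PySem.List.pyGetD rowspan r none
  let vs := PySem.List.pyGetD colspan c none
  (match hs with
   | some hb => decide (hb.1 ≤ c ∧ c ≤ hb.2)
   | none => false) ||
  (match vs with
   | some vbp => decide (vbp.1 ≤ r ∧ r ≤ vbp.2)
   | none => false) ||
  (match vs with
   | some vbp =>
     (PySem.List.pyRange 0 rows 1).any (fun r0 =>
       match PySem.List.pyGetD rowspan r0 none with
       | some h0 => decide (h0.1 ≤ c ∧ c ≤ h0.2 ∧ vbp.1 ≤ r0 ∧ r0 ≤ vbp.2 ∧
           ((2 * r0 - vbp.2 ≤ r ∧ r < vbp.1) ∨ (vbp.2 < r ∧ r ≤ 2 * r0 - vbp.1)))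
       | none => false)
   | none => false) ||
  (match hs with
   | some hbp =>
     (PySem.List.pyRange 0 cols 1).any (fun c0 =>
       match PySem.List.pyGetD colspan c0 none with
       | some v0 => decide (v0.1 ≤ r ∧ r ≤ v0.2 ∧ hbp.1 ≤ c0 ∧ c0 ≤ hbp.2 ∧
           ((2 * c0 - hbp.2 ≤ c ∧ c < hbp.1) ∨ (hbp.2 < c ∧ c ≤ 2 * c0 - hbp.1)))
       | none => false)
   | none => false)

def transform_alt (grid_lst : List (List Int)) : List (List Int) :=
  if grid_lst = [] ∨ PySem.List.pyGetD grid_lst 0 [] = [] then []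
  else
    let rows : Int := grid_lst.length
    let cols : Int := (PySem.List.pyGetD grid_lst 0 []).length
    let rowspan := pvRowSpan grid_lst rows cols
    let colspan := pvColSpan grid_lst rows cols
    -- single declarative render pass
    (PySem.List.enumerate grid_lst).map (fun (p : Int × List Int) =>
      (PySem.List.pyRange 0 ((p.2.length : Int)) 1).map (fun c =>
        let v := PySem.List.pyGetD p.2 c 0
        if c < cols ∧ v = 5 ∧ pvLit rowspan colspan rows cols p.1 c = true then 8 else v))

-- ===== PRECONDITION & SPEC =====
-- Pre_ excludes exactly the ragged grids whose later rows are shorter than the first row: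
-- there Python A raises IndexError while scanning 'grid[r][c] for c in range(cols)'.
def Pre_transform (grid_lst : List (List Int)) : Prop :=
  ∀ row ∈ grid_lst, (grid_lst.headD []).length ≤ row.length
instance (grid_lst : List (List Int)) : Decidable (Pre_transform grid_lst) := by
  unfold Pre_transform; infer_instance

def pvWitness_transform : List (List Int) := [[2, 5, 2], [0, 5, 0], [2, 0, 2]]

def Spec_transform (grid_lst : List (List Int)) (out : List (List Int)) : Prop := out = transform_alt grid_lst
instance (grid_lst : List (List Int)) (out : List (List Int)) : Decidable (Spec_transform grid_lst out) := by unfold Spec_transform; infer_instance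

-- ===== CLAIM (what is proved, stated in full; the proofs are below) =====
def Claim_equal_transform : Prop := ∀ (grid_lst : List (List Int)), Dom_transform grid_lst → Pre_transform grid_lst → Spec_transform grid_lst (transform grid_lst)

-- ===== LEMMAS AND PROOFS =====

lemma pvGetD_nn {α : Type} (xs : List α) (i : Int) (d : α) (h : 0 ≤ i) :
    PySem.List.pyGetD xs i d = xs.getD i.toNat d := by
  simp [PySem.List.pyGetD, PySem.List.pyGet?_of_nonneg xs h, List.getD]

lemma pvCellA_nn (g : List (List Int)) (r c : Int) (hr : 0 ≤ r) (hc : 0 ≤ c) :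
    pvCellA g r c = (g.getD r.toNat []).getD c.toNat 0 := by
  rw [pvCellA, pvGetD_nn g r [] hr, pvGetD_nn _ c 0 hc]

-- shorthand for the bar endpoints A computes
def pvMnC (g : List (List Int)) (cols r : Int) : Int :=
  (PySem.List.min? (pvRedCols g cols r) (fun x => x)).getD 0
def pvMxC (g : List (List Int)) (cols r : Int) : Int :=
  (PySem.List.max? (pvRedCols g cols r) (fun x => x)).getD 0
def pvMnR (g : List (List Int)) (rows c : Int) : Int :=
  (PySem.List.min? (pvRedRows g rows c) (fun x => x)).getD 0
def pvMxR (g : List (List Int)) (rows c : Int) : Int :=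
  (PySem.List.max? (pvRedRows g rows c) (fun x => x)).getD 0

-- ---- the list of coordinates A's passes mark, in order ----
def pvGapRowPairs (g : List (List Int)) (rows cols : Int) : List (Int × Int) :=
  (PySem.List.pyRange 0 rows 1).flatMap (fun r =>
    if 2 ≤ (pvRedCols g cols r).length then
      (PySem.List.pyRange (pvMnC g cols r) (pvMxC g cols r + 1) 1).map (fun c => (r, c))
    else [])

def pvGapColPairs (g : List (List Int)) (rows cols : Int) : List (Int × Int) :=
  (PySem.List.pyRange 0 cols 1).flatMap (fun c =>
    if 2 ≤ (pvRedRows g rows c).length then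
      (PySem.List.pyRange (pvMnR g rows c) (pvMxR g rows c + 1) 1).map (fun rr => (rr, c))
    else [])

def pvArmsA (hb vb : Int × Int × Int) (rows cols : Int) : List (Int × Int) :=
  (if hb.1 - vb.2.1 < max (hb.1 - vb.2.1) (vb.2.2 - hb.1) then
    ((PySem.List.pyRange 1 (max (hb.1 - vb.2.1) (vb.2.2 - hb.1) - (hb.1 - vb.2.1) + 1) 1).map
      (fun k => (vb.2.1 - k, vb.1))).filter (fun q => decide (0 ≤ q.1 ∧ q.1 < rows))
  else []) ++
  (if vb.2.2 - hb.1 < max (hb.1 - vb.2.1) (vb.2.2 - hb.1) then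
    ((PySem.List.pyRange 1 (max (hb.1 - vb.2.1) (vb.2.2 - hb.1) - (vb.2.2 - hb.1) + 1) 1).map
      (fun k => (vb.2.2 + k, vb.1))).filter (fun q => decide (0 ≤ q.1 ∧ q.1 < rows))
  else []) ++
  (if vb.1 - hb.2.1 < max (vb.1 - hb.2.1) (hb.2.2 - vb.1) then
    ((PySem.List.pyRange 1 (max (vb.1 - hb.2.1) (hb.2.2 - vb.1) - (vb.1 - hb.2.1) + 1) 1).map
      (fun k => (hb.1, hb.2.1 - k))).filter (fun q => decide (0 ≤ q.2 ∧ q.2 < cols))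
  else []) ++
  (if hb.2.2 - vb.1 < max (vb.1 - hb.2.1) (hb.2.2 - vb.1) then
    ((PySem.List.pyRange 1 (max (vb.1 - hb.2.1) (hb.2.2 - vb.1) - (hb.2.2 - vb.1) + 1) 1).map
      (fun k => (hb.1, hb.2.2 + k))).filter (fun q => decide (0 ≤ q.2 ∧ q.2 < cols))
  else [])

def pvExtPairsA (g : List (List Int)) (rows cols : Int) : List (Int × Int) :=
  (pvHBars g rows cols).flatMap (fun hb =>
    (pvVBars g rows cols).flatMap (fun vb =>
      if hb.2.1 ≤ vb.1 ∧ vb.1 ≤ hb.2.2 ∧ vb.2.1 ≤ hb.1 ∧ hb.1 ≤ vb.2.2 then pvArmsA hb vb rows cols else []))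

def pvPairsA (g : List (List Int)) (rows cols : Int) : List (Int × Int) :=
  pvGapRowPairs g rows cols ++ pvGapColPairs g rows cols ++ pvExtPairsA g rows cols

-- ---- A's result as a fold of pvMarkA over pvPairsA ----
lemma pvPassRows_eq (g : List (List Int)) (rows cols : Int) (o : List (List Int)) :
    pvPassRows g rows cols o =
      (pvGapRowPairs g rows cols).foldl (fun o p => pvMarkA g o p.1 p.2) o := by
  simp only [pvPassRows]
  rw [pvGapRowPairs, List.foldl_flatMap]
  apply PySem.List.foldl_congr_mem
  intro acc r _
  by_cases hbar : 2 ≤ (pvRedCols g cols r).length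
  · rw [if_pos hbar, if_pos hbar, List.foldl_map]
    rfl
  · rw [if_neg hbar, if_neg hbar, List.foldl_nil]

lemma pvPassCols_eq (g : List (List Int)) (rows cols : Int) (o : List (List Int)) :
    pvPassCols g rows cols o =
      (pvGapColPairs g rows cols).foldl (fun o p => pvMarkA g o p.1 p.2) o := by
  simp only [pvPassCols]
  rw [pvGapColPairs, List.foldl_flatMap]
  apply PySem.List.foldl_congr_mem
  intro acc c _
  by_cases hbar : 2 ≤ (pvRedRows g rows c).length
  · rw [if_pos hbar, if_pos hbar, List.foldl_map]
    rfl
  · rw [if_neg hbar, if_neg hbar, List.foldl_nil]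

lemma pvPassExt_eq (g : List (List Int)) (rows cols : Int) (o : List (List Int)) :
    pvPassExt g rows cols o =
      (pvExtPairsA g rows cols).foldl (fun o p => pvMarkA g o p.1 p.2) o := by
  simp only [pvPassExt]
  rw [pvExtPairsA, List.foldl_flatMap]
  apply PySem.List.foldl_congr_mem
  intro acc hb _
  rw [List.foldl_flatMap]
  apply PySem.List.foldl_congr_mem
  intro acc2 vb _
  by_cases hcond : hb.2.1 ≤ vb.1 ∧ vb.1 ≤ hb.2.2 ∧ vb.2.1 ≤ hb.1 ∧ hb.1 ≤ vb.2.2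
  · rw [if_pos hcond, if_pos hcond, pvArmsA,
      List.foldl_append, List.foldl_append, List.foldl_append]
    have h1 : ∀ x : List (List Int),
        (if hb.1 - vb.2.1 < max (hb.1 - vb.2.1) (vb.2.2 - hb.1) then
          (PySem.List.pyRange 1 (max (hb.1 - vb.2.1) (vb.2.2 - hb.1) - (hb.1 - vb.2.1) + 1) 1).foldl
            (fun output k => if 0 ≤ vb.2.1 - k ∧ vb.2.1 - k < rows then
              pvMarkA g output (vb.2.1 - k) vb.1 else output) x
         else x)
        = (if hb.1 - vb.2.1 < max (hb.1 - vb.2.1) (vb.2.2 - hb.1) then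
            ((PySem.List.pyRange 1 (max (hb.1 - vb.2.1) (vb.2.2 - hb.1) - (hb.1 - vb.2.1) + 1) 1).map
              (fun k => (vb.2.1 - k, vb.1))).filter (fun q => decide (0 ≤ q.1 ∧ q.1 < rows))
           else []).foldl (fun o p => pvMarkA g o p.1 p.2) x := by
      intro x
      split
      · rw [← PySem.List.foldl_ite_eq_foldl_filter
          (p := fun q : Int × Int => 0 ≤ q.1 ∧ q.1 < rows)
          (f := fun o p => pvMarkA g o p.1 p.2), List.foldl_map]
      · rfl
    have h2 : ∀ x : List (List Int),
        (if vb.2.2 - hb.1 < max (hb.1 - vb.2.1) (vb.2.2 - hb.1) then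
          (PySem.List.pyRange 1 (max (hb.1 - vb.2.1) (vb.2.2 - hb.1) - (vb.2.2 - hb.1) + 1) 1).foldl
            (fun output k => if 0 ≤ vb.2.2 + k ∧ vb.2.2 + k < rows then
              pvMarkA g output (vb.2.2 + k) vb.1 else output) x
         else x)
        = (if vb.2.2 - hb.1 < max (hb.1 - vb.2.1) (vb.2.2 - hb.1) then
            ((PySem.List.pyRange 1 (max (hb.1 - vb.2.1) (vb.2.2 - hb.1) - (vb.2.2 - hb.1) + 1) 1).map
              (fun k => (vb.2.2 + k, vb.1))).filter (fun q => decide (0 ≤ q.1 ∧ q.1 < rows))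
           else []).foldl (fun o p => pvMarkA g o p.1 p.2) x := by
      intro x
      split
      · rw [← PySem.List.foldl_ite_eq_foldl_filter
          (p := fun q : Int × Int => 0 ≤ q.1 ∧ q.1 < rows)
          (f := fun o p => pvMarkA g o p.1 p.2), List.foldl_map]
      · rfl
    have h3 : ∀ x : List (List Int),
        (if vb.1 - hb.2.1 < max (vb.1 - hb.2.1) (hb.2.2 - vb.1) then
          (PySem.List.pyRange 1 (max (vb.1 - hb.2.1) (hb.2.2 - vb.1) - (vb.1 - hb.2.1) + 1) 1).foldl
            (fun output k => if 0 ≤ hb.2.1 - k ∧ hb.2.1 - k < cols then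
              pvMarkA g output hb.1 (hb.2.1 - k) else output) x
         else x)
        = (if vb.1 - hb.2.1 < max (vb.1 - hb.2.1) (hb.2.2 - vb.1) then
            ((PySem.List.pyRange 1 (max (vb.1 - hb.2.1) (hb.2.2 - vb.1) - (vb.1 - hb.2.1) + 1) 1).map
              (fun k => (hb.1, hb.2.1 - k))).filter (fun q => decide (0 ≤ q.2 ∧ q.2 < cols))
           else []).foldl (fun o p => pvMarkA g o p.1 p.2) x := by
      intro x
      split
      · rw [← PySem.List.foldl_ite_eq_foldl_filter
          (p := fun q : Int × Int => 0 ≤ q.2 ∧ q.2 < cols)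
          (f := fun o p => pvMarkA g o p.1 p.2), List.foldl_map]
      · rfl
    have h4 : ∀ x : List (List Int),
        (if hb.2.2 - vb.1 < max (vb.1 - hb.2.1) (hb.2.2 - vb.1) then
          (PySem.List.pyRange 1 (max (vb.1 - hb.2.1) (hb.2.2 - vb.1) - (hb.2.2 - vb.1) + 1) 1).foldl
            (fun output k => if 0 ≤ hb.2.2 + k ∧ hb.2.2 + k < cols then
              pvMarkA g output hb.1 (hb.2.2 + k) else output) x
         else x)
        = (if hb.2.2 - vb.1 < max (vb.1 - hb.2.1) (hb.2.2 - vb.1) then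
            ((PySem.List.pyRange 1 (max (vb.1 - hb.2.1) (hb.2.2 - vb.1) - (hb.2.2 - vb.1) + 1) 1).map
              (fun k => (hb.1, hb.2.2 + k))).filter (fun q => decide (0 ≤ q.2 ∧ q.2 < cols))
           else []).foldl (fun o p => pvMarkA g o p.1 p.2) x := by
      intro x
      split
      · rw [← PySem.List.foldl_ite_eq_foldl_filter
          (p := fun q : Int × Int => 0 ≤ q.2 ∧ q.2 < cols)
          (f := fun o p => pvMarkA g o p.1 p.2), List.foldl_map]
      · rfl
    rw [h1, h2, h3, h4]
  · rw [if_neg hcond, if_neg hcond, List.foldl_nil]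

lemma pvA_norm (g : List (List Int)) (hne : ¬(g = [] ∨ PySem.List.pyGetD g 0 [] = [])) :
    transform g = (pvPairsA g g.length (PySem.List.pyGetD g 0 []).length).foldl
      (fun o p => pvMarkA g o p.1 p.2) g := by
  simp only [transform]
  rw [if_neg hne, pvPassRows_eq, pvPassCols_eq, pvPassExt_eq, pvPairsA,
    List.foldl_append, List.foldl_append]

-- ---- pointwise description of a mark fold ----
lemma pvShape_mark (g o : List (List Int)) (r c : Int) (hr : 0 ≤ r) :
    (pvMarkA g o r c).map List.length = o.map List.length := by
  rw [pvMarkA]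
  split
  · rw [PySem.List.pySetD_of_nonneg _ _ hr, pvGetD_nn _ _ _ hr, List.map_set,
      PySem.List.length_pySetD]
    by_cases hlt : r.toNat < o.length
    · apply List.ext_getElem?
      intro n
      rw [List.getElem?_set]
      split
      · rename_i hn
        subst hn
        rw [if_pos (by simpa using hlt), List.getElem?_map, List.getElem?_eq_getElem hlt]
        rw [List.getD_eq_getElem _ _ hlt]
        rfl
      · rfl
    · rw [List.set_eq_of_length_le]
      simpa using Nat.le_of_not_lt hlt
  · rfl

lemma pvCell_ne_zero_range (g : List (List Int)) (r c : Int) (hr : 0 ≤ r) (hc : 0 ≤ c)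
    (h : pvCellA g r c ≠ 0) :
    r.toNat < g.length ∧ c.toNat < (g.getD r.toNat []).length := by
  rw [pvCellA_nn g r c hr hc] at h
  have h1 : r.toNat < g.length := by
    by_contra hh
    push Not at hh
    rw [List.getD_eq_default _ _ hh] at h
    simp [List.getD] at h
  refine ⟨h1, ?_⟩
  by_contra hh
  push Not at hh
  rw [List.getD_eq_default _ _ hh] at h
  exact h rfl

lemma pvCell_mark (g o : List (List Int)) (a b r c : Int) (ha : 0 ≤ a) (hb : 0 ≤ b)
    (hr : 0 ≤ r) (hc : 0 ≤ c) (hsh : o.map List.length = g.map List.length) :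
    pvCellA (pvMarkA g o a b) r c =
      if (r = a ∧ c = b) ∧ pvCellA g a b = 5 then 8 else pvCellA o r c := by
  rw [pvMarkA]
  by_cases h5 : pvCellA g a b = 5
  · rw [if_pos h5]
    obtain ⟨ha', hb'⟩ := pvCell_ne_zero_range g a b ha hb (by rw [h5]; norm_num)
    have hlen : o.length = g.length := by simpa using congrArg List.length hsh
    have hrow : (o.getD a.toNat []).length = (g.getD a.toNat []).length := by
      have h1 : (o.map List.length)[a.toNat]? = (g.map List.length)[a.toNat]? := by rw [hsh]
      rw [List.getElem?_map, List.getElem?_map, List.getElem?_eq_getElem ha',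
        List.getElem?_eq_getElem (hlen ▸ ha')] at h1
      simp only [Option.map_some, Option.some.injEq] at h1
      rw [List.getD_eq_getElem _ _ (hlen ▸ ha'), List.getD_eq_getElem _ _ ha', h1]
    have hao : a.toNat < o.length := hlen ▸ ha'
    have hbo : b.toNat < (o.getD a.toNat []).length := by rw [hrow]; exact hb'
    rw [PySem.List.pySetD_of_nonneg _ _ ha, PySem.List.pySetD_of_nonneg _ _ hb,
      pvGetD_nn _ _ _ ha, pvCellA_nn _ _ _ hr hc, pvCellA_nn _ _ _ hr hc]
    have hiff : ((r = a ∧ c = b) ∧ pvCellA g a b = 5) ↔ (r.toNat = a.toNat ∧ c.toNat = b.toNat) := by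
      constructor
      · rintro ⟨⟨h1, h2⟩, -⟩; omega
      · rintro ⟨h1, h2⟩; exact ⟨⟨by omega, by omega⟩, h5⟩
    rw [if_congr hiff rfl rfl]
    simp only [List.getD_eq_getElem?_getD, List.getElem?_set]
    by_cases hra : r.toNat = a.toNat
    · rw [if_pos hra.symm, if_pos hao]
      simp only [Option.getD_some, List.getElem?_set]
      have hbo' : b.toNat < (o[a.toNat]?.getD []).length := hbo
      by_cases hcb : c.toNat = b.toNat
      · rw [if_pos hcb.symm, if_pos hbo', if_pos ⟨hra, hcb⟩]
        rfl
      · rw [if_neg (fun h => hcb h.symm), if_neg (by tauto)]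
        simp only [hra]
    · rw [if_neg (by omega), if_neg (by tauto)]
  · rw [if_neg h5, if_neg (by tauto)]

lemma pvShape_fold (g o : List (List Int)) (ps : List (Int × Int))
    (hps : ∀ p ∈ ps, 0 ≤ p.1 ∧ 0 ≤ p.2) :
    (ps.foldl (fun o p => pvMarkA g o p.1 p.2) o).map List.length = o.map List.length := by
  induction ps generalizing o with
  | nil => rfl
  | cons p t ih =>
    rw [List.foldl_cons, ih _ (fun q hq => hps q (List.mem_cons_of_mem _ hq)),
      pvShape_mark g o p.1 p.2 (hps p (List.mem_cons_self)).1]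

lemma pvCell_fold (g : List (List Int)) (ps : List (Int × Int))
    (hps : ∀ p ∈ ps, 0 ≤ p.1 ∧ 0 ≤ p.2) :
    ∀ (o : List (List Int)), o.map List.length = g.map List.length →
    ∀ (r c : Int), 0 ≤ r → 0 ≤ c →
    pvCellA (ps.foldl (fun o p => pvMarkA g o p.1 p.2) o) r c =
      if pvCellA g r c = 5 ∧ (r, c) ∈ ps then 8 else pvCellA o r c := by
  induction ps with
  | nil => intro o _ r c hr hc; simp
  | cons p t ih =>
    intro o hsh r c hr hc
    have hp := hps p (List.mem_cons_self)
    have hsh' : (pvMarkA g o p.1 p.2).map List.length = g.map List.length := by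
      rw [pvShape_mark g o p.1 p.2 hp.1, hsh]
    rw [List.foldl_cons,
      ih (fun q hq => hps q (List.mem_cons_of_mem _ hq)) _ hsh' r c hr hc,
      pvCell_mark g o p.1 p.2 r c hp.1 hp.2 hr hc hsh]
    rcases p with ⟨pa, pb⟩
    simp only [List.mem_cons, Prod.mk.injEq]
    by_cases h1 : pvCellA g r c = 5 <;> by_cases h3 : r = pa ∧ c = pb
    · obtain ⟨e1, e2⟩ := h3
      subst e1; subst e2
      by_cases h2 : (r, c) ∈ t <;> simp [h1, h2]
    · by_cases h2 : (r, c) ∈ t <;> simp [h1, h2, h3]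
    · obtain ⟨e1, e2⟩ := h3
      subst e1; subst e2
      by_cases h2 : (r, c) ∈ t <;> simp [h1, h2]
    · by_cases h2 : (r, c) ∈ t <;> simp [h1, h2, h3]

-- ---- generic helpers ----
lemma pvFlatMap_ite {α β : Type} (l : List α) (p : α → Prop) [DecidablePred p] (f : α → List β) :
    l.flatMap (fun x => if p x then f x else []) =
      (l.filter (fun x => decide (p x))).flatMap f := by
  induction l with
  | nil => rfl
  | cons x t ih => by_cases h : p x <;> simp [h, ih]

lemma pvHBars_eq (g : List (List Int)) (rows cols : Int) :
    pvHBars g rows cols =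
      ((PySem.List.pyRange 0 rows 1).filter (fun r => decide (2 ≤ (pvRedCols g cols r).length))).map
        (fun r => (r, pvMnC g cols r, pvMxC g cols r)) := by
  simp only [pvHBars]
  rw [PySem.List.foldl_append_ite (p := fun r => 2 ≤ (pvRedCols g cols r).length)
    (f := fun r => (r, (PySem.List.min? (pvRedCols g cols r) (fun x => x)).getD 0,
                       (PySem.List.max? (pvRedCols g cols r) (fun x => x)).getD 0))]
  rfl

lemma pvVBars_eq (g : List (List Int)) (rows cols : Int) :
    pvVBars g rows cols =
      ((PySem.List.pyRange 0 cols 1).filter (fun c => decide (2 ≤ (pvRedRows g rows c).length))).map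
        (fun c => (c, pvMnR g rows c, pvMxR g rows c)) := by
  simp only [pvVBars]
  rw [PySem.List.foldl_append_ite (p := fun c => 2 ≤ (pvRedRows g rows c).length)
    (f := fun c => (c, (PySem.List.min? (pvRedRows g rows c) (fun x => x)).getD 0,
                       (PySem.List.max? (pvRedRows g rows c) (fun x => x)).getD 0))]
  rfl

lemma pvBounds_aux (red : List Int) (bound : Int)
    (hsub : ∀ x ∈ red, 0 ≤ x ∧ x < bound) (hlen : 2 ≤ red.length) :
    0 ≤ (PySem.List.min? red (fun x => x)).getD 0 ∧
    (PySem.List.min? red (fun x => x)).getD 0 ≤ (PySem.List.max? red (fun x => x)).getD 0 ∧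
    (PySem.List.max? red (fun x => x)).getD 0 < bound := by
  have hne : red ≠ [] := by
    intro h; rw [h] at hlen; simp at hlen
  obtain ⟨m, hm⟩ : ∃ m, PySem.List.min? red (fun x => x) = some m := by
    cases h : PySem.List.min? red (fun x => x) with
    | none => exact absurd ((PySem.List.min?_eq_none_iff red _).mp h) hne
    | some m => exact ⟨m, rfl⟩
  obtain ⟨M, hM⟩ : ∃ M, PySem.List.max? red (fun x => x) = some M := by
    cases h : PySem.List.max? red (fun x => x) with
    | none => exact absurd ((PySem.List.max?_eq_none_iff red _).mp h) hne
    | some M => exact ⟨M, rfl⟩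
  have hmmem := PySem.List.min?_mem hm
  have hMmem := PySem.List.max?_mem hM
  have hle := PySem.List.min?_isMin hm M hMmem
  rw [hm, hM]
  simp only [Option.getD_some]
  exact ⟨(hsub m hmmem).1, hle, (hsub M hMmem).2⟩

lemma pvRedCols_sub (g : List (List Int)) (cols r : Int) :
    ∀ x ∈ pvRedCols g cols r, 0 ≤ x ∧ x < cols := by
  intro x hx
  rw [pvRedCols, List.mem_filter] at hx
  exact PySem.List.mem_pyRange_one.mp hx.1

lemma pvRedRows_sub (g : List (List Int)) (rows c : Int) :
    ∀ x ∈ pvRedRows g rows c, 0 ≤ x ∧ x < rows := by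
  intro x hx
  rw [pvRedRows, List.mem_filter] at hx
  exact PySem.List.mem_pyRange_one.mp hx.1

lemma pvBoundsC (g : List (List Int)) (cols r : Int) (h : 2 ≤ (pvRedCols g cols r).length) :
    0 ≤ pvMnC g cols r ∧ pvMnC g cols r ≤ pvMxC g cols r ∧ pvMxC g cols r < cols :=
  pvBounds_aux _ _ (pvRedCols_sub g cols r) h

lemma pvBoundsR (g : List (List Int)) (rows c : Int) (h : 2 ≤ (pvRedRows g rows c).length) :
    0 ≤ pvMnR g rows c ∧ pvMnR g rows c ≤ pvMxR g rows c ∧ pvMxR g rows c < rows :=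
  pvBounds_aux _ _ (pvRedRows_sub g rows c) h

lemma pvMemV (a b c x y : Int) :
    ((x, y) ∈ (PySem.List.pyRange a b 1).map (fun t => (t, c))) ↔ (a ≤ x ∧ x < b ∧ y = c) := by
  constructor
  · intro h
    obtain ⟨k, hk, he⟩ := List.mem_map.mp h
    rw [PySem.List.mem_pyRange_one] at hk
    injection he with he1 he2
    refine ⟨by omega, by omega, by omega⟩
  · rintro ⟨h1, h2, rfl⟩
    exact List.mem_map.mpr ⟨x, PySem.List.mem_pyRange_one.mpr ⟨h1, h2⟩, rfl⟩

lemma pvMemVsub (a b c w x y : Int) :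
    ((x, y) ∈ (PySem.List.pyRange a b 1).map (fun k => (w - k, c))) ↔
      (w - b < x ∧ x ≤ w - a ∧ y = c) := by
  constructor
  · intro h
    obtain ⟨k, hk, he⟩ := List.mem_map.mp h
    rw [PySem.List.mem_pyRange_one] at hk
    injection he with he1 he2
    refine ⟨by omega, by omega, by omega⟩
  · rintro ⟨h1, h2, rfl⟩
    refine List.mem_map.mpr ⟨w - x, PySem.List.mem_pyRange_one.mpr ⟨by omega, by omega⟩, ?_⟩
    rw [show w - (w - x) = x by ring]

lemma pvMemVadd (a b c w x y : Int) :
    ((x, y) ∈ (PySem.List.pyRange a b 1).map (fun k => (w + k, c))) ↔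
      (w + a ≤ x ∧ x < w + b ∧ y = c) := by
  constructor
  · intro h
    obtain ⟨k, hk, he⟩ := List.mem_map.mp h
    rw [PySem.List.mem_pyRange_one] at hk
    injection he with he1 he2
    refine ⟨by omega, by omega, by omega⟩
  · rintro ⟨h1, h2, rfl⟩
    refine List.mem_map.mpr ⟨x - w, PySem.List.mem_pyRange_one.mpr ⟨by omega, by omega⟩, ?_⟩
    rw [show w + (x - w) = x by ring]

lemma pvMemH (a b r x y : Int) :
    ((x, y) ∈ (PySem.List.pyRange a b 1).map (fun t => (r, t))) ↔ (x = r ∧ a ≤ y ∧ y < b) := by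
  constructor
  · intro h
    obtain ⟨k, hk, he⟩ := List.mem_map.mp h
    rw [PySem.List.mem_pyRange_one] at hk
    injection he with he1 he2
    refine ⟨by omega, by omega, by omega⟩
  · rintro ⟨rfl, h1, h2⟩
    exact List.mem_map.mpr ⟨y, PySem.List.mem_pyRange_one.mpr ⟨h1, h2⟩, rfl⟩

lemma pvMemHsub (a b r w x y : Int) :
    ((x, y) ∈ (PySem.List.pyRange a b 1).map (fun k => (r, w - k))) ↔
      (x = r ∧ w - b < y ∧ y ≤ w - a) := by
  constructor
  · intro h
    obtain ⟨k, hk, he⟩ := List.mem_map.mp h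
    rw [PySem.List.mem_pyRange_one] at hk
    injection he with he1 he2
    refine ⟨by omega, by omega, by omega⟩
  · rintro ⟨rfl, h1, h2⟩
    refine List.mem_map.mpr ⟨w - y, PySem.List.mem_pyRange_one.mpr ⟨by omega, by omega⟩, ?_⟩
    rw [show w - (w - y) = y by ring]

lemma pvMemHadd (a b r w x y : Int) :
    ((x, y) ∈ (PySem.List.pyRange a b 1).map (fun k => (r, w + k))) ↔
      (x = r ∧ w + a ≤ y ∧ y < w + b) := by
  constructor
  · intro h
    obtain ⟨k, hk, he⟩ := List.mem_map.mp h
    rw [PySem.List.mem_pyRange_one] at hk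
    injection he with he1 he2
    refine ⟨by omega, by omega, by omega⟩
  · rintro ⟨rfl, h1, h2⟩
    refine List.mem_map.mpr ⟨y - w, PySem.List.mem_pyRange_one.mpr ⟨by omega, by omega⟩, ?_⟩
    rw [show w + (y - w) = y by ring]

-- ---- membership in the bar tables ----
lemma pvMemHBars (g : List (List Int)) (rows cols : Int) (hb : Int × Int × Int) :
    hb ∈ pvHBars g rows cols ↔
      ∃ r, (0 ≤ r ∧ r < rows) ∧ 2 ≤ (pvRedCols g cols r).length ∧
        hb = (r, pvMnC g cols r, pvMxC g cols r) := by
  rw [pvHBars_eq]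
  constructor
  · intro h
    obtain ⟨r, hr, rfl⟩ := List.mem_map.mp h
    rw [List.mem_filter] at hr
    exact ⟨r, PySem.List.mem_pyRange_one.mp hr.1, of_decide_eq_true hr.2, rfl⟩
  · rintro ⟨r, hr, hlen, rfl⟩
    exact List.mem_map.mpr ⟨r, List.mem_filter.mpr
      ⟨PySem.List.mem_pyRange_one.mpr hr, decide_eq_true hlen⟩, rfl⟩

lemma pvMemVBars (g : List (List Int)) (rows cols : Int) (vb : Int × Int × Int) :
    vb ∈ pvVBars g rows cols ↔
      ∃ c, (0 ≤ c ∧ c < cols) ∧ 2 ≤ (pvRedRows g rows c).length ∧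
        vb = (c, pvMnR g rows c, pvMxR g rows c) := by
  rw [pvVBars_eq]
  constructor
  · intro h
    obtain ⟨c, hc, rfl⟩ := List.mem_map.mp h
    rw [List.mem_filter] at hc
    exact ⟨c, PySem.List.mem_pyRange_one.mp hc.1, of_decide_eq_true hc.2, rfl⟩
  · rintro ⟨c, hc, hlen, rfl⟩
    exact List.mem_map.mpr ⟨c, List.mem_filter.mpr
      ⟨PySem.List.mem_pyRange_one.mpr hc, decide_eq_true hlen⟩, rfl⟩

-- ---- membership in A's mark list ----
lemma pvMemGapRow (g : List (List Int)) (rows cols r c : Int) (hr : 0 ≤ r ∧ r < rows) :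
    ((r, c) ∈ pvGapRowPairs g rows cols) ↔
      (2 ≤ (pvRedCols g cols r).length ∧ pvMnC g cols r ≤ c ∧ c ≤ pvMxC g cols r) := by
  rw [pvGapRowPairs, pvFlatMap_ite _ (fun r => 2 ≤ (pvRedCols g cols r).length), List.mem_flatMap]
  constructor
  · rintro ⟨r', hr', hmem⟩
    rw [List.mem_filter] at hr'
    rw [pvMemH] at hmem
    obtain ⟨rfl, h1, h2⟩ := hmem
    exact ⟨of_decide_eq_true hr'.2, h1, by omega⟩
  · rintro ⟨hlen, h1, h2⟩
    refine ⟨r, List.mem_filter.mpr ⟨PySem.List.mem_pyRange_one.mpr hr, decide_eq_true hlen⟩, ?_⟩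
    rw [pvMemH]
    exact ⟨rfl, h1, by omega⟩

lemma pvMemGapCol (g : List (List Int)) (rows cols r c : Int) (hc : 0 ≤ c ∧ c < cols) :
    ((r, c) ∈ pvGapColPairs g rows cols) ↔
      (2 ≤ (pvRedRows g rows c).length ∧ pvMnR g rows c ≤ r ∧ r ≤ pvMxR g rows c) := by
  rw [pvGapColPairs, pvFlatMap_ite _ (fun c => 2 ≤ (pvRedRows g rows c).length), List.mem_flatMap]
  constructor
  · rintro ⟨c', hc', hmem⟩
    rw [List.mem_filter] at hc'
    rw [pvMemV] at hmem
    obtain ⟨h1, h2, rfl⟩ := hmem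
    exact ⟨of_decide_eq_true hc'.2, h1, by omega⟩
  · rintro ⟨hlen, h1, h2⟩
    refine ⟨c, List.mem_filter.mpr ⟨PySem.List.mem_pyRange_one.mpr hc, decide_eq_true hlen⟩, ?_⟩
    rw [pvMemV]
    exact ⟨h1, by omega, rfl⟩

-- the two existential forms the per-cell rule tests for extension arms
def pvVertArm (g : List (List Int)) (rows cols r c : Int) : Prop :=
  2 ≤ (pvRedRows g rows c).length ∧
  ∃ r0, (0 ≤ r0 ∧ r0 < rows) ∧ 2 ≤ (pvRedCols g cols r0).length ∧
    pvMnC g cols r0 ≤ c ∧ c ≤ pvMxC g cols r0 ∧ pvMnR g rows c ≤ r0 ∧ r0 ≤ pvMxR g rows c ∧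
    ((2 * r0 - pvMxR g rows c ≤ r ∧ r < pvMnR g rows c) ∨
     (pvMxR g rows c < r ∧ r ≤ 2 * r0 - pvMnR g rows c))

def pvHorizArm (g : List (List Int)) (rows cols r c : Int) : Prop :=
  2 ≤ (pvRedCols g cols r).length ∧
  ∃ c0, (0 ≤ c0 ∧ c0 < cols) ∧ 2 ≤ (pvRedRows g rows c0).length ∧
    pvMnR g rows c0 ≤ r ∧ r ≤ pvMxR g rows c0 ∧ pvMnC g cols r ≤ c0 ∧ c0 ≤ pvMxC g cols r ∧
    ((2 * c0 - pvMxC g cols r ≤ c ∧ c < pvMnC g cols r) ∨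
     (pvMxC g cols r < c ∧ c ≤ 2 * c0 - pvMnC g cols r))

lemma pvMemExt (g : List (List Int)) (rows cols r c : Int)
    (hr : 0 ≤ r ∧ r < rows) (hc : 0 ≤ c ∧ c < cols) :
    ((r, c) ∈ pvExtPairsA g rows cols) ↔
      (pvVertArm g rows cols r c ∨ pvHorizArm g rows cols r c) := by
  rw [pvExtPairsA, List.mem_flatMap]
  constructor
  · rintro ⟨hb, hhb, hm⟩
    rw [List.mem_flatMap] at hm
    obtain ⟨vb, hvb, hm⟩ := hm
    rw [List.mem_ite_nil_right] at hm
    obtain ⟨hcond, harm⟩ := hm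
    obtain ⟨r0, hr0, hlenH, rfl⟩ := (pvMemHBars g rows cols hb).mp hhb
    obtain ⟨c0, hc0, hlenV, rfl⟩ := (pvMemVBars g rows cols vb).mp hvb
    simp only at hcond
    obtain ⟨bc1, bc2, bc3⟩ := pvBoundsC g cols r0 hlenH
    obtain ⟨br1, br2, br3⟩ := pvBoundsR g rows c0 hlenV
    simp only [pvArmsA, List.mem_append, List.mem_ite_nil_right, List.mem_filter,
      decide_eq_true_eq, pvMemVsub, pvMemVadd, pvMemHsub, pvMemHadd] at harm
    obtain ⟨q1, q2, q3, q4⟩ := hcond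
    rcases harm with ((⟨hif, ⟨ha1, ha2, ha3⟩, hb1, hb2⟩ | ⟨hif, ⟨ha1, ha2, ha3⟩, hb1, hb2⟩) |
        ⟨hif, ⟨ha3, ha1, ha2⟩, hb1, hb2⟩) | ⟨hif, ⟨ha3, ha1, ha2⟩, hb1, hb2⟩
    · subst ha3
      exact Or.inl ⟨hlenV, r0, hr0, hlenH, by omega⟩
    · subst ha3
      exact Or.inl ⟨hlenV, r0, hr0, hlenH, by omega⟩
    · subst ha3
      exact Or.inr ⟨hlenH, c0, hc0, hlenV, by omega⟩
    · subst ha3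
      exact Or.inr ⟨hlenH, c0, hc0, hlenV, by omega⟩
  · rintro (⟨hlenV, r0, hr0, hlenH, hh1, hh2, hh3, hh4, hmir⟩ |
            ⟨hlenH, c0, hc0, hlenV, hh1, hh2, hh3, hh4, hmir⟩)
    · refine ⟨(r0, pvMnC g cols r0, pvMxC g cols r0),
        (pvMemHBars g rows cols _).mpr ⟨r0, hr0, hlenH, rfl⟩, ?_⟩
      rw [List.mem_flatMap]
      refine ⟨(c, pvMnR g rows c, pvMxR g rows c),
        (pvMemVBars g rows cols _).mpr ⟨c, hc, hlenV, rfl⟩, ?_⟩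
      rw [List.mem_ite_nil_right]
      obtain ⟨bc1, bc2, bc3⟩ := pvBoundsC g cols r0 hlenH
      obtain ⟨br1, br2, br3⟩ := pvBoundsR g rows c hlenV
      refine ⟨⟨hh1, hh2, hh3, hh4⟩, ?_⟩
      simp only [pvArmsA, List.mem_append, List.mem_ite_nil_right, List.mem_filter,
        decide_eq_true_eq, pvMemVsub, pvMemVadd, pvMemHsub, pvMemHadd]
      rcases hmir with hmr | hmr
      · left; left; left
        rw [max_eq_right (by omega : r0 - pvMnR g rows c ≤ pvMxR g rows c - r0)]
        simp only [and_true]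
        omega
      · left; left; right
        rw [max_eq_left (by omega : pvMxR g rows c - r0 ≤ r0 - pvMnR g rows c)]
        simp only [and_true]
        omega
    · refine ⟨(r, pvMnC g cols r, pvMxC g cols r),
        (pvMemHBars g rows cols _).mpr ⟨r, hr, hlenH, rfl⟩, ?_⟩
      rw [List.mem_flatMap]
      refine ⟨(c0, pvMnR g rows c0, pvMxR g rows c0),
        (pvMemVBars g rows cols _).mpr ⟨c0, hc0, hlenV, rfl⟩, ?_⟩
      rw [List.mem_ite_nil_right]
      obtain ⟨bc1, bc2, bc3⟩ := pvBoundsC g cols r hlenH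
      obtain ⟨br1, br2, br3⟩ := pvBoundsR g rows c0 hlenV
      refine ⟨⟨hh3, hh4, hh1, hh2⟩, ?_⟩
      simp only [pvArmsA, List.mem_append, List.mem_ite_nil_right, List.mem_filter,
        decide_eq_true_eq, pvMemVsub, pvMemVadd, pvMemHsub, pvMemHadd]
      rcases hmir with hmr | hmr
      · left; right
        rw [max_eq_right (by omega : c0 - pvMnC g cols r ≤ pvMxC g cols r - c0)]
        simp only [true_and]
        omega
      · right
        rw [max_eq_left (by omega : pvMxC g cols r - c0 ≤ c0 - pvMnC g cols r)]
        simp only [true_and]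
        omega

-- every pair A marks has a nonnegative row, and a column inside [0, cols)
lemma pvPairsA_bounds (g : List (List Int)) (rows cols : Int) :
    ∀ p ∈ pvPairsA g rows cols, 0 ≤ p.1 ∧ 0 ≤ p.2 ∧ p.2 < cols := by
  intro p hp
  obtain ⟨x, y⟩ := p
  rw [pvPairsA, List.mem_append, List.mem_append] at hp
  rcases hp with (hp | hp) | hp
  · rw [pvGapRowPairs, pvFlatMap_ite _ (fun r => 2 ≤ (pvRedCols g cols r).length),
      List.mem_flatMap] at hp
    obtain ⟨r', hr', hmem⟩ := hp
    rw [List.mem_filter] at hr'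
    have hb := PySem.List.mem_pyRange_one.mp hr'.1
    obtain ⟨b1, b2, b3⟩ := pvBoundsC g cols r' (of_decide_eq_true hr'.2)
    rw [pvMemH] at hmem
    refine ⟨by omega, by omega, by omega⟩
  · rw [pvGapColPairs, pvFlatMap_ite _ (fun c => 2 ≤ (pvRedRows g rows c).length),
      List.mem_flatMap] at hp
    obtain ⟨c', hc', hmem⟩ := hp
    rw [List.mem_filter] at hc'
    have hb := PySem.List.mem_pyRange_one.mp hc'.1
    obtain ⟨b1, b2, b3⟩ := pvBoundsR g rows c' (of_decide_eq_true hc'.2)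
    rw [pvMemV] at hmem
    refine ⟨by omega, by omega, by omega⟩
  · rw [pvExtPairsA, List.mem_flatMap] at hp
    obtain ⟨hb, hhb, hp2⟩ := hp
    rw [List.mem_flatMap] at hp2
    obtain ⟨vb, hvb, hp3⟩ := hp2
    obtain ⟨r0, hr0, hlenH, rfl⟩ := (pvMemHBars g rows cols hb).mp hhb
    obtain ⟨c0, hc0, hlenV, rfl⟩ := (pvMemVBars g rows cols vb).mp hvb
    obtain ⟨bc1, bc2, bc3⟩ := pvBoundsC g cols r0 hlenH
    obtain ⟨br1, br2, br3⟩ := pvBoundsR g rows c0 hlenV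
    rw [List.mem_ite_nil_right] at hp3
    obtain ⟨-, hp4⟩ := hp3
    simp only [pvArmsA, List.mem_append, List.mem_ite_nil_right, List.mem_filter,
      decide_eq_true_eq, pvMemVsub, pvMemVadd, pvMemHsub, pvMemHadd] at hp4
    omega

-- ---- B's span tables ----
lemma pvFoldl_append_map {α β : Type} (l : List α) (f : α → β) :
    l.foldl (fun acc x => acc ++ [f x]) [] = l.map f := by
  rw [PySem.List.foldl_append_eq_flatMap (fun x => [f x]) l [], List.nil_append]
  induction l with
  | nil => rfl
  | cons x t ih => rw [List.flatMap_cons, List.map_cons, List.singleton_append, ih]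

-- first/last element of a strictly increasing list = its min/max
lemma pvEnds (l : List Int) (hp : l.Pairwise (· < ·)) (hne : l ≠ []) :
    (PySem.List.pyGet? l 0).getD 0 = (PySem.List.min? l (fun x => x)).getD 0 ∧
    (PySem.List.pyGet? l (-1)).getD 0 = (PySem.List.max? l (fun x => x)).getD 0 := by
  have hlen : 0 < l.length := List.length_pos_iff.mpr hne
  have hget0 : PySem.List.pyGet? l 0 = some l[0] := by
    rw [PySem.List.pyGet?_of_nonneg l le_rfl]
    simp [List.getElem?_eq_getElem hlen]
  have hgetn : PySem.List.pyGet? l (-1) = some l[l.length - 1] := by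
    simp only [PySem.List.pyGet?, PySem.List.pyIdx?]
    rw [if_neg (by omega), if_pos (by omega)]
    simp only [Option.bind_some]
    have : (-(-1 : Int)).toNat = 1 := rfl
    rw [this, List.getElem?_eq_getElem (by omega)]
  have hmono := List.pairwise_iff_getElem.mp hp
  obtain ⟨m, hm⟩ : ∃ m, PySem.List.min? l (fun x => x) = some m := by
    cases h : PySem.List.min? l (fun x => x) with
    | none => exact absurd ((PySem.List.min?_eq_none_iff l _).mp h) hne
    | some m => exact ⟨m, rfl⟩
  obtain ⟨M, hM⟩ : ∃ M, PySem.List.max? l (fun x => x) = some M := by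
    cases h : PySem.List.max? l (fun x => x) with
    | none => exact absurd ((PySem.List.max?_eq_none_iff l _).mp h) hne
    | some M => exact ⟨M, rfl⟩
  have hmem0 : l[0] ∈ l := List.getElem_mem hlen
  have hmemn : l[l.length - 1] ∈ l := List.getElem_mem (by omega)
  have hmle : m ≤ l[0] := PySem.List.min?_isMin hm _ hmem0
  have hMge : l[l.length - 1] ≤ M := PySem.List.max?_isMax hM _ hmemn
  obtain ⟨km, hkm, hkm2⟩ := List.mem_iff_getElem.mp (PySem.List.min?_mem hm)
  obtain ⟨kM, hkM, hkM2⟩ := List.mem_iff_getElem.mp (PySem.List.max?_mem hM)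
  have h0le : l[0] ≤ m := by
    rcases Nat.eq_or_lt_of_le (Nat.zero_le km) with h | h
    · have h' : km = 0 := h.symm
      subst h'
      exact le_of_eq hkm2
    · rw [← hkm2]
      exact le_of_lt (hmono 0 km hlen hkm h)
  have hnge : M ≤ l[l.length - 1] := by
    rcases Nat.eq_or_lt_of_le (Nat.le_of_lt_succ (by omega : kM < l.length - 1 + 1)) with h | h
    · subst h
      exact le_of_eq hkM2.symm
    · rw [← hkM2]
      exact le_of_lt (hmono kM (l.length - 1) (by omega) (by omega) h)
  rw [hget0, hgetn, hm, hM]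
  simp only [Option.getD_some]
  exact ⟨by omega, by omega⟩

lemma pvRedCols_sorted (g : List (List Int)) (cols r : Int) :
    (pvRedCols g cols r).Pairwise (· < ·) :=
  List.Pairwise.filter _ (PySem.List.pairwise_lt_pyRange_one 0 cols)

lemma pvRedRows_sorted (g : List (List Int)) (rows c : Int) :
    (pvRedRows g rows c).Pairwise (· < ·) :=
  List.Pairwise.filter _ (PySem.List.pairwise_lt_pyRange_one 0 rows)

lemma pvRowSpan_get (g : List (List Int)) (rows cols r : Int) (h0 : 0 ≤ r) (h1 : r < rows) :
    PySem.List.pyGetD (pvRowSpan g rows cols) r none =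
      if 2 ≤ (pvRedCols g cols r).length then some (pvMnC g cols r, pvMxC g cols r)
      else none := by
  simp only [pvRowSpan]
  rw [pvFoldl_append_map]
  rw [PySem.List.pyGetD_map_pyRange_of_nonneg _ rows r none h0 h1]
  by_cases hlen : 2 ≤ (pvRedCols g cols r).length
  · have hne : pvRedCols g cols r ≠ [] := by
      intro h; rw [h] at hlen; simp at hlen
    obtain ⟨e1, e2⟩ := pvEnds _ (pvRedCols_sorted g cols r) hne
    rw [if_pos hlen, if_pos hlen, e1, e2]
    rfl
  · rw [if_neg hlen, if_neg hlen]

lemma pvColSpan_get (g : List (List Int)) (rows cols c : Int) (h0 : 0 ≤ c) (h1 : c < cols) :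
    PySem.List.pyGetD (pvColSpan g rows cols) c none =
      if 2 ≤ (pvRedRows g rows c).length then some (pvMnR g rows c, pvMxR g rows c)
      else none := by
  simp only [pvColSpan]
  rw [pvFoldl_append_map]
  rw [PySem.List.pyGetD_map_pyRange_of_nonneg _ cols c none h0 h1]
  by_cases hlen : 2 ≤ (pvRedRows g rows c).length
  · have hne : pvRedRows g rows c ≠ [] := by
      intro h; rw [h] at hlen; simp at hlen
    obtain ⟨e1, e2⟩ := pvEnds _ (pvRedRows_sorted g rows c) hne
    rw [if_pos hlen, if_pos hlen, e1, e2]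
    rfl
  · rw [if_neg hlen, if_neg hlen]

-- the two 'any' scans of the per-cell rule
lemma pvAnyVert (g : List (List Int)) (rows cols r c vt vb : Int) :
    (((PySem.List.pyRange 0 rows 1).any (fun r0 =>
       match PySem.List.pyGetD (pvRowSpan g rows cols) r0 none with
       | some h0 => decide (h0.1 ≤ c ∧ c ≤ h0.2 ∧ vt ≤ r0 ∧ r0 ≤ vb ∧
           ((2 * r0 - vb ≤ r ∧ r < vt) ∨ (vb < r ∧ r ≤ 2 * r0 - vt)))
       | none => false)) = true) ↔
      ∃ r0, (0 ≤ r0 ∧ r0 < rows) ∧ 2 ≤ (pvRedCols g cols r0).length ∧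
        pvMnC g cols r0 ≤ c ∧ c ≤ pvMxC g cols r0 ∧ vt ≤ r0 ∧ r0 ≤ vb ∧
        ((2 * r0 - vb ≤ r ∧ r < vt) ∨ (vb < r ∧ r ≤ 2 * r0 - vt)) := by
  rw [List.any_eq_true]
  constructor
  · rintro ⟨r0, hmem, hp⟩
    have hb := PySem.List.mem_pyRange_one.mp hmem
    rw [pvRowSpan_get g rows cols r0 hb.1 hb.2] at hp
    by_cases hlen : 2 ≤ (pvRedCols g cols r0).length
    · rw [if_pos hlen] at hp
      simp only [decide_eq_true_eq] at hp
      exact ⟨r0, hb, hlen, hp.1, hp.2.1, hp.2.2⟩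
    · rw [if_neg hlen] at hp
      exact absurd hp (by simp)
  · rintro ⟨r0, hb, hlen, h1, h2, h3⟩
    refine ⟨r0, PySem.List.mem_pyRange_one.mpr hb, ?_⟩
    rw [pvRowSpan_get g rows cols r0 hb.1 hb.2, if_pos hlen]
    simp only [decide_eq_true_eq]
    exact ⟨h1, h2, h3⟩

lemma pvAnyHoriz (g : List (List Int)) (rows cols r c hl hr : Int) :
    (((PySem.List.pyRange 0 cols 1).any (fun c0 =>
       match PySem.List.pyGetD (pvColSpan g rows cols) c0 none with
       | some v0 => decide (v0.1 ≤ r ∧ r ≤ v0.2 ∧ hl ≤ c0 ∧ c0 ≤ hr ∧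
           ((2 * c0 - hr ≤ c ∧ c < hl) ∨ (hr < c ∧ c ≤ 2 * c0 - hl)))
       | none => false)) = true) ↔
      ∃ c0, (0 ≤ c0 ∧ c0 < cols) ∧ 2 ≤ (pvRedRows g rows c0).length ∧
        pvMnR g rows c0 ≤ r ∧ r ≤ pvMxR g rows c0 ∧ hl ≤ c0 ∧ c0 ≤ hr ∧
        ((2 * c0 - hr ≤ c ∧ c < hl) ∨ (hr < c ∧ c ≤ 2 * c0 - hl)) := by
  rw [List.any_eq_true]
  constructor
  · rintro ⟨c0, hmem, hp⟩
    have hb := PySem.List.mem_pyRange_one.mp hmem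
    rw [pvColSpan_get g rows cols c0 hb.1 hb.2] at hp
    by_cases hlen : 2 ≤ (pvRedRows g rows c0).length
    · rw [if_pos hlen] at hp
      simp only [decide_eq_true_eq] at hp
      exact ⟨c0, hb, hlen, hp.1, hp.2.1, hp.2.2⟩
    · rw [if_neg hlen] at hp
      exact absurd hp (by simp)
  · rintro ⟨c0, hb, hlen, h1, h2, h3⟩
    refine ⟨c0, PySem.List.mem_pyRange_one.mpr hb, ?_⟩
    rw [pvColSpan_get g rows cols c0 hb.1 hb.2, if_pos hlen]
    simp only [decide_eq_true_eq]
    exact ⟨h1, h2, h3⟩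

-- ---- the per-cell rule decides exactly membership in A's mark list ----
lemma pvLit_iff (g : List (List Int)) (rows cols r c : Int)
    (hr : 0 ≤ r ∧ r < rows) (hc : 0 ≤ c ∧ c < cols) :
    (pvLit (pvRowSpan g rows cols) (pvColSpan g rows cols) rows cols r c = true) ↔
      (r, c) ∈ pvPairsA g rows cols := by
  rw [pvPairsA, List.mem_append, List.mem_append,
    pvMemGapRow g rows cols r c hr, pvMemGapCol g rows cols r c hc,
    pvMemExt g rows cols r c hr hc]
  simp only [pvLit]
  rw [pvRowSpan_get g rows cols r hr.1 hr.2, pvColSpan_get g rows cols c hc.1 hc.2]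
  by_cases hH : 2 ≤ (pvRedCols g cols r).length <;>
    by_cases hV : 2 ≤ (pvRedRows g rows c).length
  · rw [if_pos hH, if_pos hV]
    simp only [Bool.or_eq_true, decide_eq_true_eq, pvAnyVert, pvAnyHoriz,
      pvVertArm, pvHorizArm]
    constructor
    · rintro (((h | h) | h) | h)
      · exact Or.inl (Or.inl ⟨hH, h⟩)
      · exact Or.inl (Or.inr ⟨hV, h⟩)
      · exact Or.inr (Or.inl ⟨hV, h⟩)
      · exact Or.inr (Or.inr ⟨hH, h⟩)
    · rintro ((⟨-, h⟩ | ⟨-, h⟩) | (⟨-, h⟩ | ⟨-, h⟩))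
      · exact Or.inl (Or.inl (Or.inl h))
      · exact Or.inl (Or.inl (Or.inr h))
      · exact Or.inl (Or.inr h)
      · exact Or.inr h
  · rw [if_pos hH, if_neg hV]
    simp only [Bool.or_eq_true, decide_eq_true_eq, pvAnyHoriz, pvVertArm, pvHorizArm]
    constructor
    · rintro (((h | h) | h) | h)
      · exact Or.inl (Or.inl ⟨hH, h⟩)
      · exact absurd h (by simp)
      · exact absurd h (by simp)
      · exact Or.inr (Or.inr ⟨hH, h⟩)
    · rintro ((⟨-, h⟩ | ⟨hV', -⟩) | (⟨hV', -⟩ | ⟨-, h⟩))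
      · exact Or.inl (Or.inl (Or.inl h))
      · exact absurd hV' hV
      · exact absurd hV' hV
      · exact Or.inr h
  · rw [if_neg hH, if_pos hV]
    simp only [Bool.or_eq_true, decide_eq_true_eq, pvAnyVert, pvVertArm, pvHorizArm]
    constructor
    · rintro (((h | h) | h) | h)
      · exact absurd h (by simp)
      · exact Or.inl (Or.inr ⟨hV, h⟩)
      · exact Or.inr (Or.inl ⟨hV, h⟩)
      · exact absurd h (by simp)
    · rintro ((⟨hH', -⟩ | ⟨-, h⟩) | (⟨-, h⟩ | ⟨hH', -⟩))
      · exact absurd hH' hH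
      · exact Or.inl (Or.inl (Or.inr h))
      · exact Or.inl (Or.inr h)
      · exact absurd hH' hH
  · rw [if_neg hH, if_neg hV]
    simp only [Bool.or_eq_true, pvVertArm, pvHorizArm]
    constructor
    · rintro (((h | h) | h) | h) <;> exact absurd h (by simp)
    · rintro ((⟨hH', -⟩ | ⟨hV', -⟩) | (⟨hV', -⟩ | ⟨hH', -⟩))
      · exact absurd hH' hH
      · exact absurd hV' hV
      · exact absurd hV' hV
      · exact absurd hH' hH

-- ---- reading cells ----
lemma pvCell_getElem (x : List (List Int)) (r c : Nat) (hr : r < x.length)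
    (hc : c < x[r].length) : pvCellA x (r : Int) (c : Int) = x[r][c] := by
  rw [pvCellA_nn _ _ _ (Int.natCast_nonneg r) (Int.natCast_nonneg c)]
  simp only [Int.toNat_natCast]
  rw [List.getD_eq_getElem _ _ hr, List.getD_eq_getElem _ _ hc]

-- ===== VERDICT (by name: the statement is the Claim_ definition above) =====
theorem transform_spec : Claim_equal_transform := by
  unfold Claim_equal_transform
  intro g _hdom _hpre
  unfold Spec_transform
  by_cases hne : g = [] ∨ PySem.List.pyGetD g 0 [] = []
  · rw [transform, transform_alt, if_pos hne, if_pos hne]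
  · have hnn : ∀ p ∈ pvPairsA g (g.length : Int) ((PySem.List.pyGetD g 0 []).length : Int),
        0 ≤ p.1 ∧ 0 ≤ p.2 := by
      intro p hp
      obtain ⟨h1, h2, -⟩ := pvPairsA_bounds g _ _ p hp
      exact ⟨h1, h2⟩
    have hsh := pvShape_fold g g _ hnn
    have hlen : ((pvPairsA g (g.length : Int) ((PySem.List.pyGetD g 0 []).length : Int)).foldl
        (fun o p => pvMarkA g o p.1 p.2) g).length = g.length := by
      simpa using congrArg List.length hsh
    rw [pvA_norm g hne]
    simp only [transform_alt]
    rw [if_neg hne]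
    apply List.ext_getElem
    · rw [hlen]
      simp [PySem.List.length_enumerate]
    · intro i h1 h2
      have hig : i < g.length := by rwa [hlen] at h1
      have hrl : ((pvPairsA g (g.length : Int) ((PySem.List.pyGetD g 0 []).length : Int)).foldl
          (fun o p => pvMarkA g o p.1 p.2) g)[i].length = g[i].length := by
        have e := congrArg (fun l => l[i]?) hsh
        simp only [List.getElem?_map, List.getElem?_eq_getElem h1,
          List.getElem?_eq_getElem hig, Option.map_some, Option.some.injEq] at e
        exact e
      apply List.ext_getElem
      · rw [hrl]
        simp [List.getElem_map, PySem.List.getElem_enumerate,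
          PySem.List.length_pyRange_one]
      · intro j hj1 hj2
        have hjg : j < g[i].length := by rwa [hrl] at hj1
        rw [← pvCell_getElem _ i j h1 hj1,
          pvCell_fold g _ hnn g rfl (i : Int) (j : Int) (Int.natCast_nonneg i) (Int.natCast_nonneg j),
          pvCell_getElem g i j hig hjg]
        simp only [List.getElem_map, PySem.List.getElem_enumerate,
          PySem.List.getElem_pyRange_one, zero_add]
        have hv : PySem.List.pyGetD g[i] (j : Int) 0 = g[i][j] := by
          rw [pvGetD_nn _ _ _ (Int.natCast_nonneg j)]
          simp only [Int.toNat_natCast]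
          exact List.getD_eq_getElem _ _ hjg
        rw [hv]
        by_cases hcol : (j : Int) < ((PySem.List.pyGetD g 0 []).length : Int)
        · have hiff : ((j : Int) < ((PySem.List.pyGetD g 0 []).length : Int) ∧ g[i][j] = 5 ∧
              pvLit (pvRowSpan g (g.length : Int) ((PySem.List.pyGetD g 0 []).length : Int))
                (pvColSpan g (g.length : Int) ((PySem.List.pyGetD g 0 []).length : Int))
                (g.length : Int) ((PySem.List.pyGetD g 0 []).length : Int) (i : Int) (j : Int) = true)
              ↔ (g[i][j] = 5 ∧ ((i : Int), (j : Int)) ∈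
                  pvPairsA g (g.length : Int) ((PySem.List.pyGetD g 0 []).length : Int)) := by
            rw [pvLit_iff g (g.length : Int) ((PySem.List.pyGetD g 0 []).length : Int) (i : Int) (j : Int)
              ⟨Int.natCast_nonneg i, by exact_mod_cast hig⟩ ⟨Int.natCast_nonneg j, hcol⟩]
            tauto
          rw [if_congr hiff.symm rfl rfl]
        · have hnm : ¬ (g[i][j] = 5 ∧ ((i : Int), (j : Int)) ∈
              pvPairsA g (g.length : Int) ((PySem.List.pyGetD g 0 []).length : Int)) := by
            rintro ⟨-, hmem⟩
            obtain ⟨-, -, h3⟩ := pvPairsA_bounds g _ _ _ hmem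
            exact hcol h3
          rw [if_neg hnm, if_neg (by tauto)]
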